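-- pv_equiv track=rewrite | github.com/trainrex42/Advent-of-Code-2017 | 20/solve2.py | collide
-- ===== SOURCE A (Python) =====
-- def collide(particles):
--     dead = []
--     for i,particle1 in enumerate(particles):
--         for j,particle2 in enumerate(particles):
--             if i == j:
--                 continue
--             else:
--                 if (particle1[0] == particle2[0]) and particle1 not in dead:
--                     dead.append(particle1)
--
--     for p in dead:
--         particles.remove(p)
--
--     return len(dead)
--
-- particles = []
-- ===== SOURCE B (Python) =====
-- def collide(particles):
--     counts = {}
--     for p in particles:
--         k = tuple(p[0])
--         counts[k] = counts.get(k, 0) + 1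
--     dead = []
--     for p in particles:
--         if counts[tuple(p[0])] >= 2 and p not in dead:
--             dead.append(p)
--     for p in dead:
--         particles.remove(p)
--     return len(dead)
-- ===== Notes on version B (the rewrite author's own statement) =====
-- stated objective: faster
-- what changed: Replaces the all-pairs O(n^2) rescan with a one-pass position-count dictionary followed by a single pass collecting distinct particles whose position count is >= 2.
-- outside the precondition, e.g. on collide([[]]): A returns 0, B raises IndexError
import Mathlib
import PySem

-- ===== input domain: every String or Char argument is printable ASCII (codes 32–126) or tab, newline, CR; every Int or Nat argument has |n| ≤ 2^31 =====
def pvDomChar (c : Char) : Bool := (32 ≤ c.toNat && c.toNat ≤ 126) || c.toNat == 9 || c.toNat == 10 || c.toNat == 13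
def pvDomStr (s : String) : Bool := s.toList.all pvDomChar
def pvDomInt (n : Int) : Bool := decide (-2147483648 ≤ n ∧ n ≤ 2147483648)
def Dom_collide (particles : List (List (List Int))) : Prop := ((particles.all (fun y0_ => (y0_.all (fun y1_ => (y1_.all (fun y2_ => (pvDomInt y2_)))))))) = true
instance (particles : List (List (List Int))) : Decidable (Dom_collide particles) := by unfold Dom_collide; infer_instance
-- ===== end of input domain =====

-- B replaces A's all-pairs O(n^2) rescan by a position-count dictionary built in one pass
-- plus a single collecting pass (faster). Both Pythons also remove the dead particles from
-- the argument list in place (the same mutation); the equivalence proved here is about the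
-- RETURN value.

-- ===== PORT A =====
def collide (particles : List (List (List Int))) : Int :=
  -- nested 'for i,particle1 / for j,particle2 in enumerate(particles)';
  -- particle[0] ported as pyGetD _ 0 [] (exact on Pre_: every particle nonempty)
  ((PySem.List.enumerate particles).foldl (fun dead ip =>
      (PySem.List.enumerate particles).foldl (fun dead jq =>
        if ip.1 = jq.1 then dead
        else if PySem.List.pyGetD ip.2 0 [] = PySem.List.pyGetD jq.2 0 [] ∧ ip.2 ∉ dead
          then dead ++ [ip.2] else dead) dead)
    ([] : List (List (List Int)))).length

-- ===== PORT B =====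
def collide_alt (particles : List (List (List Int))) : Int :=
  -- counts[k] = counts.get(k, 0) + 1 over positions, then one collecting pass
  let counts : PySem.Dict (List Int) Int :=
    particles.foldl (fun d p =>
      d.insert (PySem.List.pyGetD p 0 []) (d.getD (PySem.List.pyGetD p 0 []) 0 + 1))
      PySem.Dict.empty
  ((particles.foldl (fun dead p =>
      if 2 ≤ counts.getD (PySem.List.pyGetD p 0 []) 0 ∧ p ∉ dead then dead ++ [p] else dead)
    ([] : List (List (List Int)))).length : Int)

-- ===== PRECONDITION & SPEC =====
-- Pre_ excludes lists containing an empty particle: there B's position read p[0] raises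
-- IndexError, while A returns 0 when the list is a single empty particle (and raises itself
-- as soon as there are two particles).
def Pre_collide (particles : List (List (List Int))) : Prop :=
  ∀ p ∈ particles, p ≠ []
instance (particles : List (List (List Int))) : Decidable (Pre_collide particles) := by
  unfold Pre_collide; infer_instance

def pvWitness_collide : List (List (List Int)) := [[[1, 2]], [[1, 2]], [[3]]]

def Spec_collide (particles : List (List (List Int))) (out : Int) : Prop := out = collide_alt particles
instance (particles : List (List (List Int))) (out : Int) : Decidable (Spec_collide particles out) := by unfold Spec_collide; infer_instance

-- ===== CLAIM (what is proved, stated in full; the proofs are below) =====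
def Claim_equal_collide : Prop := ∀ (particles : List (List (List Int))), Dom_collide particles → Pre_collide particles → Spec_collide particles (collide particles)

-- ===== LEMMAS AND PROOFS =====

-- once p1 is in dead, the inner loop changes nothing
lemma pv_inner_mem (i : Int) (p1 : List (List Int)) (l : List (Int × List (List Int)))
    (dead0 : List (List (List Int))) (h : p1 ∈ dead0) :
    l.foldl (fun dead jq =>
      if i = jq.1 then dead
      else if PySem.List.pyGetD p1 0 [] = PySem.List.pyGetD jq.2 0 [] ∧ p1 ∉ dead
        then dead ++ [p1] else dead) dead0 = dead0 := by
  induction l generalizing dead0 with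
  | nil => rfl
  | cons x t ih =>
    simp only [List.foldl_cons]
    split_ifs with h1 h2
    · exact ih dead0 h
    · exact absurd h h2.2
    · exact ih dead0 h

-- the whole inner loop appends p1 exactly when some other index shares p1's position
lemma pv_inner_char (i : Int) (p1 : List (List Int)) (l : List (Int × List (List Int)))
    (dead0 : List (List (List Int))) (h : p1 ∉ dead0) :
    l.foldl (fun dead jq =>
      if i = jq.1 then dead
      else if PySem.List.pyGetD p1 0 [] = PySem.List.pyGetD jq.2 0 [] ∧ p1 ∉ dead
        then dead ++ [p1] else dead) dead0
    = if ∃ x ∈ l, ¬ i = x.1 ∧ PySem.List.pyGetD p1 0 [] = PySem.List.pyGetD x.2 0 []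
        then dead0 ++ [p1] else dead0 := by
  induction l generalizing dead0 with
  | nil => simp
  | cons x t ih =>
    simp only [List.foldl_cons]
    by_cases h1 : i = x.1
    · rw [if_pos h1, ih dead0 h]
      subst h1
      have hiff : (∃ y ∈ t, ¬ x.1 = y.1 ∧ PySem.List.pyGetD p1 0 [] = PySem.List.pyGetD y.2 0 [])
          ↔ (∃ y ∈ x :: t, ¬ x.1 = y.1 ∧ PySem.List.pyGetD p1 0 [] = PySem.List.pyGetD y.2 0 []) := by
        rw [List.exists_mem_cons_iff]; simp
      rw [if_congr hiff rfl rfl]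
    · rw [if_neg h1]
      by_cases h2 : PySem.List.pyGetD p1 0 [] = PySem.List.pyGetD x.2 0 []
      · rw [if_pos ⟨h2, h⟩, pv_inner_mem i p1 t _ (by simp)]
        have : ∃ y ∈ x :: t, ¬ i = y.1 ∧ PySem.List.pyGetD p1 0 [] = PySem.List.pyGetD y.2 0 [] :=
          ⟨x, by simp, h1, h2⟩
        rw [if_pos this]
      · rw [if_neg (by tauto), ih dead0 h]
        have : (∃ y ∈ x :: t, ¬ i = y.1 ∧ PySem.List.pyGetD p1 0 [] = PySem.List.pyGetD y.2 0 [])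
            ↔ (∃ y ∈ t, ¬ i = y.1 ∧ PySem.List.pyGetD p1 0 [] = PySem.List.pyGetD y.2 0 []) := by
          constructor
          · rintro ⟨y, hy, hne, hpos⟩
            rcases List.mem_cons.mp hy with rfl | hy'
            · exact absurd hpos h2
            · exact ⟨y, hy', hne, hpos⟩
          · rintro ⟨y, hy, hne, hpos⟩; exact ⟨y, List.mem_cons_of_mem _ hy, hne, hpos⟩
        rw [if_congr this rfl rfl]

-- "another index shares the position" ↔ "the position occurs at least twice"
lemma pv_count_iff (particles : List (List (List Int))) (i : Int) (p1 : List (List Int))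
    (hmem : (i, p1) ∈ PySem.List.enumerate particles 0) :
    (∃ x ∈ PySem.List.enumerate particles 0,
        ¬ i = x.1 ∧ PySem.List.pyGetD p1 0 [] = PySem.List.pyGetD x.2 0 [])
    ↔ 2 ≤ ((particles.map (fun p => PySem.List.pyGetD p 0 [])).count (PySem.List.pyGetD p1 0 []) : Int) := by
  set e := PySem.List.enumerate particles 0 with he
  set v := PySem.List.pyGetD p1 0 [] with hv
  set pred : Int × List (List Int) → Bool := fun x => PySem.List.pyGetD x.2 0 [] == v with hpred
  have hcnt : (particles.map (fun p => PySem.List.pyGetD p 0 [])).count v = e.countP pred := by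
    rw [List.count, List.countP_map]
    have h2 : particles = e.map (·.2) := (PySem.List.map_snd_enumerate particles 0).symm
    conv_lhs => rw [h2]
    rw [List.countP_map]
    rfl
  have hflt : e.countP pred = (e.filter pred).length := List.countP_eq_length_filter
  constructor
  · rintro ⟨x, hx, hne, hpos⟩
    have hxf : x ∈ e.filter pred := List.mem_filter.mpr ⟨hx, by simp [hpred, hv, ← hpos]⟩
    have hpf : (i, p1) ∈ e.filter pred := List.mem_filter.mpr ⟨hmem, by simp [hpred, hv]⟩
    have hxne : x ≠ (i, p1) := fun h => hne (by rw [h])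
    have hlen : 1 < (e.filter pred).length := by
      have h1 : 1 < ({x, (i, p1)} : Finset (Int × List (List Int))).card := by
        simp [Finset.card_insert_of_notMem, hxne]
      have h2 : ({x, (i, p1)} : Finset (Int × List (List Int))) ⊆ (e.filter pred).toFinset := by
        intro y hy; simp only [Finset.mem_insert, Finset.mem_singleton] at hy
        rcases hy with rfl | rfl
        · exact List.mem_toFinset.mpr hxf
        · exact List.mem_toFinset.mpr hpf
      calc 1 < _ := h1
        _ ≤ (e.filter pred).toFinset.card := Finset.card_le_card h2
        _ ≤ (e.filter pred).length := (e.filter pred).toFinset_card_le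
    rw [hcnt, hflt]; exact_mod_cast hlen
  · intro h
    have hlen : 2 ≤ (e.filter pred).length := by rw [hcnt, hflt] at h; exact_mod_cast h
    have hpw : (e.filter pred).Pairwise (fun p q => p.1 < q.1) :=
      List.Pairwise.sublist (List.filter_sublist) (PySem.List.pairwise_lt_enumerate particles 0)
    rcases hl : e.filter pred with _ | ⟨a, _ | ⟨b, r⟩⟩
    · rw [hl] at hlen; simp at hlen
    · rw [hl] at hlen; simp at hlen
    · rw [hl] at hpw
      have hab : a.1 < b.1 := (List.pairwise_cons.mp hpw).1 b (by simp)
      have hbm : b ∈ e.filter pred := by rw [hl]; simp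
      have ham : a ∈ e.filter pred := by rw [hl]; simp
      by_cases hai : a.1 = i
      · obtain ⟨hbe, hbp⟩ := List.mem_filter.mp hbm
        refine ⟨b, hbe, by omega, ?_⟩
        exact (eq_of_beq hbp).symm
      · obtain ⟨hae, hap⟩ := List.mem_filter.mp ham
        refine ⟨a, hae, fun hh => hai hh.symm, ?_⟩
        exact (eq_of_beq hap).symm

theorem collide_eq (particles : List (List (List Int))) :
    collide particles = collide_alt particles := by
  unfold collide collide_alt
  have hstep1 : ∀ (acc : List (List (List Int))) (x : Int × List (List Int)),
      x ∈ PySem.List.enumerate particles 0 →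
      ((PySem.List.enumerate particles 0).foldl (fun dead jq =>
          if x.1 = jq.1 then dead
          else if PySem.List.pyGetD x.2 0 [] = PySem.List.pyGetD jq.2 0 [] ∧ x.2 ∉ dead
            then dead ++ [x.2] else dead) acc)
      = if 2 ≤ ((particles.map (fun p => PySem.List.pyGetD p 0 [])).count (PySem.List.pyGetD x.2 0 []) : Int) ∧ x.2 ∉ acc
          then acc ++ [x.2] else acc := by
    intro acc x hx
    by_cases hm : x.2 ∈ acc
    · rw [pv_inner_mem x.1 x.2 _ acc hm, if_neg (by tauto)]
    · rw [pv_inner_char x.1 x.2 _ acc hm]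
      have hiff := pv_count_iff particles x.1 x.2 (by simpa using hx)
      have hiff2 : (∃ y ∈ PySem.List.enumerate particles 0,
            ¬ x.1 = y.1 ∧ PySem.List.pyGetD x.2 0 [] = PySem.List.pyGetD y.2 0 [])
          ↔ (2 ≤ ((particles.map (fun p => PySem.List.pyGetD p 0 [])).count (PySem.List.pyGetD x.2 0 []) : Int) ∧ x.2 ∉ acc) := by
        constructor
        · intro hc; exact ⟨hiff.mp hc, hm⟩
        · rintro ⟨hc, -⟩; exact hiff.mpr hc
      rw [if_congr hiff2 rfl rfl]
  have hA : (PySem.List.enumerate particles 0).foldl (fun dead ip =>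
        (PySem.List.enumerate particles 0).foldl (fun dead jq =>
          if ip.1 = jq.1 then dead
          else if PySem.List.pyGetD ip.2 0 [] = PySem.List.pyGetD jq.2 0 [] ∧ ip.2 ∉ dead
            then dead ++ [ip.2] else dead) dead) []
      = (PySem.List.enumerate particles 0).foldl (fun dead x =>
          if 2 ≤ ((particles.map (fun p => PySem.List.pyGetD p 0 [])).count (PySem.List.pyGetD x.2 0 []) : Int) ∧ x.2 ∉ dead
            then dead ++ [x.2] else dead) [] :=
    PySem.List.foldl_congr_mem _ _ _ _ hstep1
  have h2 : (PySem.List.enumerate particles 0).foldl (fun dead x =>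
        if 2 ≤ ((particles.map (fun p => PySem.List.pyGetD p 0 [])).count (PySem.List.pyGetD x.2 0 []) : Int) ∧ x.2 ∉ dead
          then dead ++ [x.2] else dead) []
      = particles.foldl (fun dead p =>
        if 2 ≤ ((particles.map (fun q => PySem.List.pyGetD q 0 [])).count (PySem.List.pyGetD p 0 []) : Int) ∧ p ∉ dead
          then dead ++ [p] else dead) [] := by
    have hfm := List.foldl_map (f := fun x : Int × List (List Int) => x.2)
      (g := fun (dead : List (List (List Int))) (p : List (List Int)) =>
        if 2 ≤ ((particles.map (fun q => PySem.List.pyGetD q 0 [])).count (PySem.List.pyGetD p 0 []) : Int) ∧ p ∉ dead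
          then dead ++ [p] else dead)
      (l := PySem.List.enumerate particles 0) (init := ([] : List (List (List Int))))
    rw [PySem.List.map_snd_enumerate] at hfm
    exact hfm.symm
  have hcounts : ∀ p : List (List Int),
      (particles.foldl (fun d q =>
          d.insert (PySem.List.pyGetD q 0 []) (d.getD (PySem.List.pyGetD q 0 []) 0 + 1))
        (PySem.Dict.empty : PySem.Dict (List Int) Int)).getD (PySem.List.pyGetD p 0 []) 0
      = ((particles.map (fun q => PySem.List.pyGetD q 0 [])).count (PySem.List.pyGetD p 0 []) : Int) := by
    intro p
    have hm : particles.foldl (fun d q =>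
          d.insert (PySem.List.pyGetD q 0 []) (d.getD (PySem.List.pyGetD q 0 []) 0 + 1))
        (PySem.Dict.empty : PySem.Dict (List Int) Int)
        = (particles.map (fun q => PySem.List.pyGetD q 0 [])).foldl
            (fun d k => d.insert k (d.getD k 0 + 1)) (PySem.Dict.empty : PySem.Dict (List Int) Int) :=
      (List.foldl_map (f := fun q : List (List Int) => PySem.List.pyGetD q 0 [])
        (g := fun (d : PySem.Dict (List Int) Int) k => d.insert k (d.getD k 0 + 1))
        (l := particles) (init := (PySem.Dict.empty : PySem.Dict (List Int) Int))).symm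
    rw [hm, PySem.Dict.getD_foldl_insert_add_one]
    simp
  have h3 : particles.foldl (fun dead p =>
        if 2 ≤ (particles.foldl (fun d q =>
              d.insert (PySem.List.pyGetD q 0 []) (d.getD (PySem.List.pyGetD q 0 []) 0 + 1))
            (PySem.Dict.empty : PySem.Dict (List Int) Int)).getD (PySem.List.pyGetD p 0 []) 0 ∧ p ∉ dead
          then dead ++ [p] else dead) []
      = particles.foldl (fun dead p =>
        if 2 ≤ ((particles.map (fun q => PySem.List.pyGetD q 0 [])).count (PySem.List.pyGetD p 0 []) : Int) ∧ p ∉ dead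
          then dead ++ [p] else dead) [] := by
    apply PySem.List.foldl_congr_mem
    intro acc p _
    rw [hcounts p]
  exact congrArg (fun l : List (List (List Int)) => (l.length : Int)) (hA.trans (h2.trans h3.symm))

-- ===== VERDICT (by name: the statement is the Claim_ definition above) =====
theorem collide_spec : Claim_equal_collide := by
  intro particles _ _
  unfold Spec_collide
  exact collide_eq particles
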